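-- pv_equiv track=rewrite | github.com/qeedquan/challenges | codegolf/rows-of-the-collatz-tree.py | collatz_rows
-- ===== SOURCE A (Python) =====
-- def collatz_rows(n, tree=None):
--     if n < 0:
--         return []
--
--     if tree is None:
--         tree = [[1]]
--
--     if n == 0:
--         return tree
--
--     row = []
--     for node in tree[-1]:
--         row.append(2 * node)
--         if node % 2 == 0 and (node - 1) % 3 == 0:
--             row.append((node - 1) // 3)
--
--     for elem in row:
--         if elem in sum(tree, []):
--             row.remove(elem)
--
--     return collatz_rows(n - 1, tree + [row])
-- ===== SOURCE B (Python) =====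
-- def collatz_rows(n, tree=None):
--     if n < 0:
--         return []
--     out = [[1]] if tree is None else list(tree)
--     for _ in range(n):
--         row = []
--         for node in out[-1]:
--             row.append(2 * node)
--             if node % 2 == 0 and (node - 1) % 3 == 0:
--                 row.append((node - 1) // 3)
--         for elem in row:
--             if elem in sum(out, []):
--                 row.remove(elem)
--         out.append(row)
--     return out
-- ===== Notes on version B (the rewrite author's own statement) =====
-- stated objective: alternative
-- what changed: Replaces A's tail recursion (rebuilding the tree argument each call) with a single iterative loop over range(n) that appends rows to a working copy of the tree; the per-row construction and dedup pass are unchanged.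
import Mathlib
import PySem

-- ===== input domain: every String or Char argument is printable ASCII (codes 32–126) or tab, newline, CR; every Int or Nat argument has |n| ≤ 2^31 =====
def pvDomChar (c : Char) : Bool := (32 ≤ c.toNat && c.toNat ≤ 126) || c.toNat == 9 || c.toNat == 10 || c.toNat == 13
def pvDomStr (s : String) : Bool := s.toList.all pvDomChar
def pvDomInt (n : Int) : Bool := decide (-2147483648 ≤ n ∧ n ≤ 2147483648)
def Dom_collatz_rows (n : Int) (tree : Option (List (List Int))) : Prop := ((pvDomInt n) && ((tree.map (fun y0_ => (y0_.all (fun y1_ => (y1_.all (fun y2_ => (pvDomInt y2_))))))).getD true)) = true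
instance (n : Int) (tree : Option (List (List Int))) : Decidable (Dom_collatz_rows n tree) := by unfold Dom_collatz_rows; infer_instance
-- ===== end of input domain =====

-- B re-expresses A's tail recursion as an explicit loop appending rows to a working copy; row
-- construction and the dedup pass are byte-for-byte the same (objective: alternative decomposition).

-- ===== PORT A =====
-- shared helper: the `for node in tree[-1]` row-building loop (identical in both Pythons)
def pvBuildRow (last : List Int) : List Int :=
  last.foldl (fun row node =>
    let row := row ++ [2 * node]
    if PySem.Int.mod node 2 = 0 ∧ PySem.Int.mod (node - 1) 3 = 0 then
      row ++ [PySem.Int.floordiv (node - 1) 3]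
    else row) []

-- shared helper: Python's `for elem in row: if elem in sum(tree,[]): row.remove(elem)` —
-- iteration over a mutating list = index-based loop; remove cannot fail (elem = row[i] ∈ row)
def pvDedup (flat : List Int) (row : List Int) (i : Nat) : List Int :=
  if h : i < row.length then
    let elem := row[i]
    if elem ∈ flat then
      pvDedup flat ((PySem.List.remove? row elem).getD row) (i + 1)
    else
      pvDedup flat row (i + 1)
  else row
termination_by row.length - i
decreasing_by
  · have hm : row[i] ∈ row := List.getElem_mem h
    rw [PySem.List.remove?_eq_some_erase row _ hm]
    simp [List.length_erase_of_mem hm]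
    omega
  · omega

def collatz_rows (n : Int) (tree : Option (List (List Int))) : List (List Int) :=
  if h1 : n < 0 then []
  else
    let t := tree.getD [[1]]
    if h2 : n = 0 then t
    else
      match t.getLast? with
      | none => []  -- Python raises IndexError here (tree[-1] on empty list); excluded by Pre_
      | some last =>
        let row := pvDedup t.flatten (pvBuildRow last) 0
        collatz_rows (n - 1) (some (t ++ [row]))
termination_by n.toNat
decreasing_by omega

-- ===== PORT B =====
def pvLoop (fuel : Nat) (out : List (List Int)) : List (List Int) :=
  match fuel with
  | 0 => out
  | k + 1 =>
    let last := out.getLast?.getD []   -- out[-1]; Python raises on empty out, excluded by Pre_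
    let row := pvDedup out.flatten (pvBuildRow last) 0
    pvLoop k (out ++ [row])

def collatz_rows_alt (n : Int) (tree : Option (List (List Int))) : List (List Int) :=
  if n < 0 then []
  else
    let out := match tree with
      | none => [[1]]
      | some t => t
    pvLoop n.toNat out

-- ===== PRECONDITION & SPEC =====
-- Pre_ excludes the inputs where A raises: IndexError (n > 0 with an explicit empty tree [],
-- where `tree[-1]` fails; B's `out[-1]` raises there too) and RecursionError (A recurses once
-- per level, so its recursion depth is exactly n and it raises for n at the interpreter's
-- recursion limit, 10000 in the test environment; since the exact failure point shifts with the
-- caller's stack depth, the cutoff n ≤ 9900 keeps a small margin below it; the margin may also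
-- exclude a few degenerate-tree inputs with 9900 < n < limit on which A still returns B's same value).
def Pre_collatz_rows (n : Int) (tree : Option (List (List Int))) : Prop :=
  (0 < n → tree ≠ some []) ∧ n ≤ 9900
instance (n : Int) (tree : Option (List (List Int))) : Decidable (Pre_collatz_rows n tree) := by
  unfold Pre_collatz_rows; infer_instance

def pvWitness_collatz_rows : Int × Option (List (List Int)) := (2, none)

def Spec_collatz_rows (n : Int) (tree : Option (List (List Int))) (out : List (List Int)) : Prop := out = collatz_rows_alt n tree
instance (n : Int) (tree : Option (List (List Int))) (out : List (List Int)) : Decidable (Spec_collatz_rows n tree out) := by unfold Spec_collatz_rows; infer_instance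

-- ===== CLAIM (what is proved, stated in full; the proofs are below) =====
def Claim_equal_collatz_rows : Prop := ∀ (n : Int) (tree : Option (List (List Int))), Dom_collatz_rows n tree → Pre_collatz_rows n tree → Spec_collatz_rows n tree (collatz_rows n tree)

-- ===== LEMMAS AND PROOFS =====

-- A on a nonnegative Nat count and explicit nonempty tree computes exactly B's loop.
theorem collatz_rows_eq_pvLoop (k : Nat) (t : List (List Int)) (ht : t ≠ []) :
    collatz_rows (k : Int) (some t) = pvLoop k t := by
  induction k generalizing t with
  | zero =>
    rw [collatz_rows]
    simp [pvLoop]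
  | succ k ih =>
    rw [collatz_rows]
    have h0 : ¬ ((k + 1 : Nat) : Int) < 0 := by omega
    have h1 : ((k + 1 : Nat) : Int) ≠ 0 := by omega
    have hlast : t.getLast? = some (t.getLast ht) := List.getLast?_eq_some_getLast ht
    simp only [h0, h1, dif_neg, not_false_iff, Option.getD_some, hlast]
    have hc : ((k + 1 : Nat) : Int) - 1 = (k : Int) := by omega
    rw [hc, ih _ (by simp)]
    simp [pvLoop, hlast]

theorem collatz_rows_none (n : Int) : collatz_rows n none = collatz_rows n (some [[1]]) := by
  rw [collatz_rows, collatz_rows]; rfl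

-- ===== VERDICT (by name: the statement is the Claim_ definition above) =====
theorem collatz_rows_spec : Claim_equal_collatz_rows := by
  intro n tree _ hpre
  unfold Spec_collatz_rows collatz_rows_alt
  by_cases hneg : n < 0
  · rw [collatz_rows]; simp [hneg]
  · simp only [if_neg hneg]
    by_cases hz : n = 0
    · subst hz
      rw [collatz_rows]
      cases tree <;> simp [pvLoop]
    · have hpos : 0 < n := by omega
      have hn : n = ((n.toNat : Int)) := by omega
      have key : ∀ t : List (List Int), t ≠ [] → collatz_rows n (some t) = pvLoop n.toNat t := by
        intro t ht
        have h := collatz_rows_eq_pvLoop n.toNat t ht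
        rwa [← hn] at h
      cases tree with
      | none =>
        rw [collatz_rows_none]
        exact key [[1]] (by simp)
      | some t =>
        exact key t (by have := hpre.1 hpos; simpa using this)
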